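-- pv_equiv track=rewrite | github.com/6mz/flow-preprocess-tools | Datasets_v2/old/datasets_lib3_old3.py | GenNameOpts
-- ===== SOURCE A (Python) =====
-- def GenNameOpts(outitems, outdirform):
--     operation = []
--     sdir = []
--     suffix = []
--     ext = []
--     # 0
--     pic_id = 0
--     if 'im' in outitems:
--         operation.append('imB')
--         sdir.append(GenSdir(pic_id, 'im', outdirform))
--         suffix.append(GenSuffix(pic_id, 'im'))
--         ext.append(GenExt('im'))
--     for pic_id in range(1, 3):
--         for outitem in outitems:
--             if outitem == 'flow':
--                 outitem = 'fBA' if pic_id == 1 else 'fAB'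
--             elif outitem == 'viz':
--                 outitem = 'vBA' if pic_id == 1 else 'vAB'
--             operation.append(GenOperation(outitem))
--             sdir.append(GenSdir(pic_id, outitem, outdirform))
--             suffix.append(GenSuffix(pic_id, outitem))
--             ext.append(GenExt(outitem))
--     return operation, sdir, suffix, ext
--
-- def GenOperation(outitem):
--     if outitem == 'im':
--         return 'imB'
--     elif outitem == 'fAB':
--         return 'flowAB'
--     elif outitem == 'fBA':
--         return 'flowBA'
--     elif outitem == 'vAB':
--         return 'flowAB_viz'
--     elif outitem == 'vBA':
--         return 'flowBA_viz'
--
-- def GenSdir(sequence_id, outitem, outdirform):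
--     sequence_strid = column_to_name(sequence_id)
--     if outitem == 'im':
--         sdir_candidate = ['show', sequence_strid]
--     elif outitem == 'fAB' or outitem == 'fBA':
--         sdir_candidate = ['flow', 'flow']
--     elif outitem == 'vAB' or outitem == 'vBA':
--         sdir_candidate = ['show', 'viz_flow']
--     return sdir_candidate[outdirform == 'split']
--
-- def GenExt(outitem):
--     if outitem == 'im':
--         return 'png'
--     elif outitem == 'fAB' or outitem == 'fBA':
--         return 'flo'
--     elif outitem == 'vAB' or outitem == 'vBA':
--         return 'jpg'
--
-- def GenSuffix(sequence_id, outitem):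
--     sequence_strid_b = column_to_name(sequence_id)
--     sequence_strid_a = column_to_name(sequence_id - 1)
--     if outitem == 'im':
--         return sequence_strid_b
--     elif outitem == 'fAB':
--         return 'gt' + sequence_strid_a + sequence_strid_b
--     elif outitem == 'fBA':
--         return 'gt' + sequence_strid_b + sequence_strid_a
--     elif outitem == 'vAB':
--         return 'viz_gt' + sequence_strid_a + sequence_strid_b
--     elif outitem == 'vBA':
--         return 'viz_gt' + sequence_strid_b + sequence_strid_a
--
-- def column_to_name(colnum):
--     # 0->A 26->AA
--     if type(colnum) is not int:
--         return colnum
--     str_ = [] if colnum > 0 else ['A']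
--     while(colnum > 0):
--         str_ += chr(colnum % 26 + ord('A'))
--         colnum //= 26
--     out = str_[::-1]
--     if len(out) > 1:
--         out[0] = chr(ord(out[0])-1)
--     return ''.join(out)
-- ===== SOURCE B (Python) =====
-- # Table-driven rewrite: all helper outputs for the finite (pic_id, item) space are
-- # precomputed constants, so one flat pass over a job list replaces the helper calls.
-- _ROW = {
--     (0, 'im'):  ('imB',         ('show', 'A'),        'A',        'png'),
--     (1, 'im'):  ('imB',         ('show', 'B'),        'B',        'png'),
--     (2, 'im'):  ('imB',         ('show', 'C'),        'C',        'png'),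
--     (1, 'flow'): ('flowBA',     ('flow', 'flow'),     'gtBA',     'flo'),
--     (2, 'flow'): ('flowAB',     ('flow', 'flow'),     'gtBC',     'flo'),
--     (1, 'viz'): ('flowBA_viz',  ('show', 'viz_flow'), 'viz_gtBA', 'jpg'),
--     (2, 'viz'): ('flowAB_viz',  ('show', 'viz_flow'), 'viz_gtBC', 'jpg'),
--     (1, 'fAB'): ('flowAB',      ('flow', 'flow'),     'gtAB',     'flo'),
--     (2, 'fAB'): ('flowAB',      ('flow', 'flow'),     'gtBC',     'flo'),
--     (1, 'fBA'): ('flowBA',      ('flow', 'flow'),     'gtBA',     'flo'),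
--     (2, 'fBA'): ('flowBA',      ('flow', 'flow'),     'gtCB',     'flo'),
--     (1, 'vAB'): ('flowAB_viz',  ('show', 'viz_flow'), 'viz_gtAB', 'jpg'),
--     (2, 'vAB'): ('flowAB_viz',  ('show', 'viz_flow'), 'viz_gtBC', 'jpg'),
--     (1, 'vBA'): ('flowBA_viz',  ('show', 'viz_flow'), 'viz_gtBA', 'jpg'),
--     (2, 'vBA'): ('flowBA_viz',  ('show', 'viz_flow'), 'viz_gtCB', 'jpg'),
-- }
--
-- def GenNameOpts(outitems, outdirform):
--     jobs = [(0, 'im')] if 'im' in outitems else []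
--     jobs += [(p, it) for p in (1, 2) for it in outitems]
--     operation, sdir, suffix, ext = [], [], [], []
--     for p, it in jobs:
--         op, (d_joined, d_split), suf, ex = _ROW[(p, it)]
--         operation.append(op)
--         sdir.append(d_split if outdirform == 'split' else d_joined)
--         suffix.append(suf)
--         ext.append(ex)
--     return operation, sdir, suffix, ext
-- ===== Notes on version B (the rewrite author's own statement) =====
-- stated objective: simpler
-- what changed: Replaces the helper-call machinery (GenOperation/GenSdir/GenSuffix/GenExt and the column_to_name digit loop) with a precomputed (pic_id, item) -> row lookup table and a single flat pass over a job list built from outitems.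
import Mathlib
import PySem

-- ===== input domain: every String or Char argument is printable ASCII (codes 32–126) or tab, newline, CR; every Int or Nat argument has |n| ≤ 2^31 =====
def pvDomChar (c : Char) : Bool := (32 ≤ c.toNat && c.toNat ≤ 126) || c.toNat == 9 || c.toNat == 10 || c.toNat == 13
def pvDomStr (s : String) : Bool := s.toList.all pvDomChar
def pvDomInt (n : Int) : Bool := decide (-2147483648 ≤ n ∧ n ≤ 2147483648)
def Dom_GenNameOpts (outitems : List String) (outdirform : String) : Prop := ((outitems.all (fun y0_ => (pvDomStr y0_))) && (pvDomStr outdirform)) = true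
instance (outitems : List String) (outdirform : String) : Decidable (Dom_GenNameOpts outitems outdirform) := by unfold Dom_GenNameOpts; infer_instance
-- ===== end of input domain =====

-- B replaces the helper-call machinery (incl. the column_to_name digit loop) by a
-- precomputed (pic_id, item) → row table and one flat pass over a job list; objective: simpler.

-- ===== PORT A =====
-- while colnum > 0: str_ += chr(colnum % 26 + ord('A')); colnum //= 26
-- (fuel = colnum.toNat bounds the iteration count; the guard makes the loop total, same values)
def c2nLoop : Nat → Int → List Char → List Char
  | 0, _, acc => acc
  | fuel+1, colnum, acc =>
    if colnum > 0 then
      c2nLoop fuel (PySem.Int.floordiv colnum 26)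
        (acc ++ [Char.ofNat (PySem.Int.mod colnum 26 + 65).toNat])
    else acc

def column_to_name (colnum : Int) : String :=
  let str_ := c2nLoop colnum.toNat colnum (if colnum > 0 then [] else ['A'])
  let out := str_.reverse
  let out := match out with
    | c :: rest => if rest.length + 1 > 1 then Char.ofNat (c.toNat - 1) :: rest else [c]
    | [] => []
  String.mk out

-- Python returns None on an unknown item; unreachable under Pre_ (we return "")
def GenOperationA (outitem : String) : String :=
  if outitem == "im" then "imB"
  else if outitem == "fAB" then "flowAB"
  else if outitem == "fBA" then "flowBA"
  else if outitem == "vAB" then "flowAB_viz"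
  else if outitem == "vBA" then "flowBA_viz"
  else ""

-- Python raises UnboundLocalError on an unknown item; unreachable under Pre_
def GenSdirA (sequence_id : Int) (outitem outdirform : String) : String :=
  let sequence_strid := column_to_name sequence_id
  let cand : String × String :=
    if outitem == "im" then ("show", sequence_strid)
    else if outitem == "fAB" || outitem == "fBA" then ("flow", "flow")
    else if outitem == "vAB" || outitem == "vBA" then ("show", "viz_flow")
    else ("", "")
  if outdirform == "split" then cand.2 else cand.1

def GenExtA (outitem : String) : String :=
  if outitem == "im" then "png"
  else if outitem == "fAB" || outitem == "fBA" then "flo"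
  else if outitem == "vAB" || outitem == "vBA" then "jpg"
  else ""

def GenSuffixA (sequence_id : Int) (outitem : String) : String :=
  let b := column_to_name sequence_id
  let a := column_to_name (sequence_id - 1)
  if outitem == "im" then b
  else if outitem == "fAB" then "gt" ++ a ++ b
  else if outitem == "fBA" then "gt" ++ b ++ a
  else if outitem == "vAB" then "viz_gt" ++ a ++ b
  else if outitem == "vBA" then "viz_gt" ++ b ++ a
  else ""

def GenNameOpts (outitems : List String) (outdirform : String) : List String × List String × List String × List String :=
  let init : List String × List String × List String × List String := ([], [], [], [])
  let st0 :=
    if outitems.contains "im" then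
      (["imB"], [GenSdirA 0 "im" outdirform], [GenSuffixA 0 "im"], [GenExtA "im"])
    else init
  (PySem.List.pyRange 1 3 1).foldl (fun st pic_id =>
    outitems.foldl (fun st outitem =>
      let outitem :=
        if outitem == "flow" then (if pic_id == 1 then "fBA" else "fAB")
        else if outitem == "viz" then (if pic_id == 1 then "vBA" else "vAB")
        else outitem
      (st.1 ++ [GenOperationA outitem],
       st.2.1 ++ [GenSdirA pic_id outitem outdirform],
       st.2.2.1 ++ [GenSuffixA pic_id outitem],
       st.2.2.2 ++ [GenExtA outitem])) st) st0

-- ===== PORT B =====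
def rowTable : PySem.Dict (Int × String) (String × (String × String) × String × String) :=
  PySem.Dict.ofList
    [ ((0, "im"),   ("imB",        ("show", "A"),        "A",        "png")),
      ((1, "im"),   ("imB",        ("show", "B"),        "B",        "png")),
      ((2, "im"),   ("imB",        ("show", "C"),        "C",        "png")),
      ((1, "flow"), ("flowBA",     ("flow", "flow"),     "gtBA",     "flo")),
      ((2, "flow"), ("flowAB",     ("flow", "flow"),     "gtBC",     "flo")),
      ((1, "viz"),  ("flowBA_viz", ("show", "viz_flow"), "viz_gtBA", "jpg")),
      ((2, "viz"),  ("flowAB_viz", ("show", "viz_flow"), "viz_gtBC", "jpg")),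
      ((1, "fAB"),  ("flowAB",     ("flow", "flow"),     "gtAB",     "flo")),
      ((2, "fAB"),  ("flowAB",     ("flow", "flow"),     "gtBC",     "flo")),
      ((1, "fBA"),  ("flowBA",     ("flow", "flow"),     "gtBA",     "flo")),
      ((2, "fBA"),  ("flowBA",     ("flow", "flow"),     "gtCB",     "flo")),
      ((1, "vAB"),  ("flowAB_viz", ("show", "viz_flow"), "viz_gtAB", "jpg")),
      ((2, "vAB"),  ("flowAB_viz", ("show", "viz_flow"), "viz_gtBC", "jpg")),
      ((1, "vBA"),  ("flowBA_viz", ("show", "viz_flow"), "viz_gtBA", "jpg")),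
      ((2, "vBA"),  ("flowBA_viz", ("show", "viz_flow"), "viz_gtCB", "jpg")) ]

def GenNameOpts_alt (outitems : List String) (outdirform : String) : List String × List String × List String × List String :=
  let jobs := (if outitems.contains "im" then [((0 : Int), "im")] else [])
              ++ ([(1 : Int), 2].flatMap (fun p => outitems.map (fun it => (p, it))))
  jobs.foldl (fun st j =>
    -- Python raises KeyError on a missing key; unreachable under Pre_ (default row)
    let row := (PySem.Dict.get? rowTable j).getD ("", ("", ""), "", "")
    (st.1 ++ [row.1],
     st.2.1 ++ [if outdirform == "split" then row.2.1.2 else row.2.1.1],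
     st.2.2.1 ++ [row.2.2.1],
     st.2.2.2 ++ [row.2.2.2])) ([], [], [], [])

-- ===== PRECONDITION & SPEC =====
-- Pre_ admits exactly the inputs on which A returns: any item outside these seven
-- makes A's GenSdir raise UnboundLocalError.
def Pre_GenNameOpts (outitems : List String) (outdirform : String) : Prop :=
  ∀ s ∈ outitems, s ∈ (["im", "flow", "viz", "fAB", "fBA", "vAB", "vBA"] : List String)

instance (outitems : List String) (outdirform : String) : Decidable (Pre_GenNameOpts outitems outdirform) := by
  unfold Pre_GenNameOpts; infer_instance

def pvWitness_GenNameOpts : List String × String := (["im", "flow", "viz"], "split")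

def Spec_GenNameOpts (outitems : List String) (outdirform : String) (out : List String × List String × List String × List String) : Prop := out = GenNameOpts_alt outitems outdirform
instance (outitems : List String) (outdirform : String) (out : List String × List String × List String × List String) : Decidable (Spec_GenNameOpts outitems outdirform out) := by unfold Spec_GenNameOpts; infer_instance

-- ===== CLAIM (what is proved, stated in full; the proofs are below) =====
def Claim_equal_GenNameOpts : Prop := ∀ (outitems : List String) (outdirform : String), Dom_GenNameOpts outitems outdirform → Pre_GenNameOpts outitems outdirform → Spec_GenNameOpts outitems outdirform (GenNameOpts outitems outdirform)

-- ===== LEMMAS AND PROOFS =====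
lemma pyRange13 : PySem.List.pyRange 1 3 1 = [(1 : Int), 2] := by decide

lemma fold_eq (outitems : List String) (outdirform : String)
    (hpre : Pre_GenNameOpts outitems outdirform) (p : Int) (hp : p = 1 ∨ p = 2)
    (st : List String × List String × List String × List String) :
    outitems.foldl (fun st outitem =>
      let outitem :=
        if outitem == "flow" then (if p == 1 then "fBA" else "fAB")
        else if outitem == "viz" then (if p == 1 then "vBA" else "vAB")
        else outitem
      (st.1 ++ [GenOperationA outitem],
       st.2.1 ++ [GenSdirA p outitem outdirform],
       st.2.2.1 ++ [GenSuffixA p outitem],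
       st.2.2.2 ++ [GenExtA outitem])) st
    = outitems.foldl (fun st it =>
        let row := (PySem.Dict.get? rowTable (p, it)).getD ("", ("", ""), "", "")
        (st.1 ++ [row.1],
         st.2.1 ++ [if outdirform == "split" then row.2.1.2 else row.2.1.1],
         st.2.2.1 ++ [row.2.2.1],
         st.2.2.2 ++ [row.2.2.2])) st := by
  apply PySem.List.foldl_congr_mem
  intro acc x hx
  have h7 := hpre x hx
  simp only [List.mem_cons, List.not_mem_nil, or_false] at h7
  rcases hp with hp | hp <;> subst hp <;>
    rcases h7 with h | h | h | h | h | h | h <;> subst h <;> rfl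

-- ===== VERDICT (by name: the statement is the Claim_ definition above) =====
theorem GenNameOpts_spec : Claim_equal_GenNameOpts := by
  intro outitems outdirform _ hpre
  unfold Spec_GenNameOpts GenNameOpts GenNameOpts_alt
  simp only [pyRange13, List.foldl_cons, List.foldl_nil, List.flatMap_cons, List.flatMap_nil,
    List.append_nil, List.foldl_append, List.foldl_map]
  rw [← fold_eq outitems outdirform hpre 1 (Or.inl rfl), ← fold_eq outitems outdirform hpre 2 (Or.inr rfl)]
  by_cases him : outitems.contains "im" = true <;> simp only [him, if_true, if_false, Bool.false_eq_true, List.foldl_cons, List.foldl_nil] <;> rfl
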